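-- pv_equiv track=rewrite | github.com/nnatchy/Python-2021-1 | old grader exam/test.py | m_sum
-- ===== SOURCE A (Python) =====
-- def m_sum(m,axis):
--     l = []
--     if axis == 0:
--         for i in range(len(m[0])):
--             t = []
--             for j in range(len(m)):
--                 t.append(m[j][i])
--             l.append(sum(t))
--     elif axis == 1:
--         for i in range(len(m)):
--             l.append(sum(m[i]))
--     return l
-- ===== SOURCE B (Python) =====
-- def m_sum(m, axis):
--     if axis == 0:
--         acc = [0] * len(m[0])
--         for row in m:
--             acc = [a + row[i] for i, a in enumerate(acc)]
--         return acc
--     if axis == 1: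
--         return [sum(row) for row in m]
--     return []
-- ===== Notes on version B (the rewrite author's own statement) =====
-- stated objective: simpler
-- what changed: Axis 0 no longer builds each column as a temporary list and sums it; B keeps one running accumulator and adds every row to it in a single row-major pass, and axis 1 becomes a per-row comprehension.
import Mathlib
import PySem

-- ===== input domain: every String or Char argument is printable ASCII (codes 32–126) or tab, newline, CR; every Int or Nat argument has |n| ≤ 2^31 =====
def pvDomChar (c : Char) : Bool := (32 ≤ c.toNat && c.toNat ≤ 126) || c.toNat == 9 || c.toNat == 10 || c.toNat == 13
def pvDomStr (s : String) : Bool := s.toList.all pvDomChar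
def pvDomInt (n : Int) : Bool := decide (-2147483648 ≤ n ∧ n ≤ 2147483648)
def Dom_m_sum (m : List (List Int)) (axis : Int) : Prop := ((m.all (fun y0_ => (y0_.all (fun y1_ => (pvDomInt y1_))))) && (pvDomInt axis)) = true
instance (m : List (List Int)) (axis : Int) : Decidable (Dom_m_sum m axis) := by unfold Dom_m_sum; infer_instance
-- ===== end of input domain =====

-- B replaces A's column-by-column build-then-sum (axis 0) with a single row-major
-- pass over the rows updating a running accumulator, and axis 1 with a per-row map
-- (objective: simpler / one pass over the rows).

-- ===== PORT A =====
def m_sum (m : List (List Int)) (axis : Int) : List Int :=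
  if axis = 0 then
    (PySem.List.pyRange 0 ((m.headD []).length : Int) 1).foldl
      (fun l i =>
        l ++ [((PySem.List.pyRange 0 (m.length : Int) 1).foldl
                 (fun t j => t ++ [PySem.List.pyGetD (PySem.List.pyGetD m j []) i 0]) []).sum]) []
  else if axis = 1 then
    (PySem.List.pyRange 0 (m.length : Int) 1).foldl
      (fun l i => l ++ [(PySem.List.pyGetD m i []).sum]) []
  else []

-- ===== PORT B =====
def m_sum_alt (m : List (List Int)) (axis : Int) : List Int :=
  if axis = 0 then
    m.foldl
      (fun acc row => (PySem.List.enumerate acc).map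
        (fun p => p.2 + PySem.List.pyGetD row p.1 0))
      (List.replicate (m.headD []).length 0)
  else if axis = 1 then
    m.map (fun row => row.sum)
  else []

-- ===== PRECONDITION & SPEC =====
-- Pre_ excludes exactly the inputs where Python A raises IndexError: axis 0 with an
-- empty matrix (m[0]) or with some row shorter than the first row (m[j][i]).
def Pre_m_sum (m : List (List Int)) (axis : Int) : Prop :=
  axis = 0 → (m ≠ [] ∧ ∀ row ∈ m, (m.headD []).length ≤ row.length)
instance (m : List (List Int)) (axis : Int) : Decidable (Pre_m_sum m axis) := by
  unfold Pre_m_sum; infer_instance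
def pvWitness_m_sum : List (List Int) × Int := ([[1, 2], [3, 4]], 0)

def Spec_m_sum (m : List (List Int)) (axis : Int) (out : List Int) : Prop := out = m_sum_alt m axis
instance (m : List (List Int)) (axis : Int) (out : List Int) : Decidable (Spec_m_sum m axis out) := by unfold Spec_m_sum; infer_instance

-- ===== CLAIM (what is proved, stated in full; the proofs are below) =====
def Claim_equal_m_sum : Prop := ∀ (m : List (List Int)) (axis : Int), Dom_m_sum m axis → Pre_m_sum m axis → Spec_m_sum m axis (m_sum m axis)

-- ===== LEMMAS AND PROOFS =====

-- column-i sum of the matrix, the common value both ports compute per output slot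
def pvColSum (m : List (List Int)) (i : Nat) : Int :=
  (m.map (fun row => PySem.List.pyGetD row (i : Int) 0)).sum

theorem pvColSum_cons (r : List Int) (m : List (List Int)) (i : Nat) :
    pvColSum (r :: m) i = PySem.List.pyGetD r (i : Int) 0 + pvColSum m i := by
  simp [pvColSum]

-- the list comprehension over enumerate, characterised by index
theorem pvStep_eq (row : List Int) (acc : List Int) (s : Int) :
    (PySem.List.enumerate acc s).map (fun p => p.2 + PySem.List.pyGetD row p.1 0)
      = (List.range acc.length).map
          (fun i => acc.getD i 0 + PySem.List.pyGetD row (s + (i : Int)) 0) := by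
  induction acc generalizing s with
  | nil => simp [PySem.List.enumerate_nil]
  | cons a acc ih =>
    simp only [PySem.List.enumerate_cons, List.map_cons, List.length_cons,
      List.range_succ_eq_map, List.map_map]
    refine congrArg₂ _ (by simp) ?_
    rw [ih (s + 1)]
    apply List.map_congr_left
    intro i _
    simp [Function.comp]
    ring_nf

-- B's loop invariant: the accumulator after folding m holds acc[i] + colsum m i
theorem pvFoldB (m : List (List Int)) (acc : List Int) :
    m.foldl
        (fun acc row => (PySem.List.enumerate acc).map
          (fun p => p.2 + PySem.List.pyGetD row p.1 0)) acc
      = (List.range acc.length).map (fun i => acc.getD i 0 + pvColSum m i) := by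
  induction m generalizing acc with
  | nil =>
    simp only [List.foldl_nil, pvColSum, List.map_nil, List.sum_nil, add_zero]
    refine List.ext_getElem (by simp) ?_
    intro i h1 h2
    simp at h1 ⊢
    simp [List.getElem?_eq_getElem, h1]
  | cons r m ih =>
    simp only [List.foldl_cons]
    rw [pvStep_eq, ih]
    simp only [List.length_map, List.length_range]
    apply List.map_congr_left
    intro i hi
    simp only [List.mem_range] at hi
    rw [List.getD_eq_getElem?_getD, List.getElem?_map, List.getElem?_range hi]
    simp [pvColSum_cons, add_assoc]

-- A's axis-0 result as a map of column sums
theorem pvInner (m : List (List Int)) (i : Int) :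
    (PySem.List.pyRange 0 (m.length : Int) 1).foldl
      (fun t j => t ++ [PySem.List.pyGetD (PySem.List.pyGetD m j []) i 0]) []
      = m.map (fun row => PySem.List.pyGetD row i 0) := by
  rw [PySem.List.foldl_pyRange_zero_pyGetD' m []
    (fun t row => t ++ [PySem.List.pyGetD row i 0]) []]
  rw [PySem.List.foldl_append_singleton_eq_map]
  rfl

theorem pvA_axis0 (m : List (List Int)) (n : Nat) :
    (PySem.List.pyRange 0 (n : Int) 1).foldl
        (fun l i =>
          l ++ [((PySem.List.pyRange 0 (m.length : Int) 1).foldl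
                   (fun t j => t ++ [PySem.List.pyGetD (PySem.List.pyGetD m j []) i 0]) []).sum]) []
      = (List.range n).map (fun i => pvColSum m i) := by
  rw [PySem.List.foldl_append_singleton_eq_map]
  simp only [List.nil_append, pvInner]
  rw [PySem.List.pyRange_zero_natCast, List.map_map]
  apply List.map_congr_left
  intro i _
  simp [pvColSum]

-- ===== VERDICT (by name: the statement is the Claim_ definition above) =====
theorem m_sum_spec : Claim_equal_m_sum := by
  intro m axis _ _
  unfold Spec_m_sum m_sum m_sum_alt
  by_cases h0 : axis = 0
  · rw [if_pos h0, if_pos h0, pvA_axis0, pvFoldB]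
    simp
  · rw [if_neg h0, if_neg h0]
    by_cases h1 : axis = 1
    · rw [if_pos h1, if_pos h1]
      rw [PySem.List.foldl_pyRange_zero_pyGetD' m []
        (fun l row => l ++ [row.sum]) []]
      rw [PySem.List.foldl_append_singleton_eq_map]
      rfl
    · rw [if_neg h1, if_neg h1]
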